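-- pv_equiv track=rewrite | github.com/moomer1/genetic-tsp-xyz | traveling_salesman.py | repair_to_permutation
-- ===== SOURCE A (Python) =====
-- from typing import List, Tuple
--
-- def repair_to_permutation(child: List[int], n: int) -> List[int]:
--     seen = set()
--     missing = [c for c in range(n) if c not in set(child)]
--     missing_idx = 0
--     fixed = []
--     for gene in child:
--         if gene not in seen:
--             fixed.append(gene)
--             seen.add(gene)
--         else:
--             fixed.append(missing[missing_idx])
--             missing_idx += 1
--     return fixed
-- ===== SOURCE B (Python) =====
-- from typing import List
--
-- def repair_to_permutation(child: List[int], n: int) -> List[int]: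
--     # Stateless positional formula: position i keeps its gene iff it is the first
--     # occurrence of that gene (child.index(g) == i); otherwise it receives missing[r],
--     # where r = i - len(set(child[:i])) is the number of non-first-occurrence
--     # positions strictly before i.
--     missing = [c for c in range(n) if c not in set(child)]
--     return [g if child.index(g) == i else missing[i - len(set(child[:i]))]
--             for i, g in enumerate(child)]
-- ===== Notes on version B (the rewrite author's own statement) =====
-- stated objective: alternative
-- what changed: Replaces A's stateful scan (seen set + missing-value cursor, appending one output per step) with a stateless per-position comprehension: no running state at all; position i keeps its gene iff child.index(g) == i, otherwise it gets missing[i - len(set(child[:i]))], the count of non-first-occurrence positions before i.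
-- outside the precondition, e.g. on repair_to_permutation([0, 0, 0], 2): A raises IndexError, B raises IndexError
import Mathlib
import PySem

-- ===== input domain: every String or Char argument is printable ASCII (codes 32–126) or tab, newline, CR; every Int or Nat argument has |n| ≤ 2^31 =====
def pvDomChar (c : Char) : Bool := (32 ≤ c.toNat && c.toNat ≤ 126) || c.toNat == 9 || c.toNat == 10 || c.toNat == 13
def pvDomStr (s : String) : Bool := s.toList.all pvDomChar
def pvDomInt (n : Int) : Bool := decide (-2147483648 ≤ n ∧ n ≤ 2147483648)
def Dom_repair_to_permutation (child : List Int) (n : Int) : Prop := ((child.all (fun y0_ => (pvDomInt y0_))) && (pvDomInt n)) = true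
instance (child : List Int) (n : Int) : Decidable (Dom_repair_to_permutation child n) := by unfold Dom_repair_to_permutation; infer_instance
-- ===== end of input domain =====

-- B replaces A's stateful decide-and-append loop (seen set + missing cursor) by a stateless
-- per-position formula: position i keeps its gene iff it is the first occurrence
-- (child.index(g) == i), else it gets missing[#duplicate positions before i]; alternative algorithm, not faster.


-- ===== PORT A =====
-- A: one loop over child; first occurrences are kept, repeated genes are replaced by the
-- next unused missing value ('missing[missing_idx]' is total only under Pre_; outside it
-- Python raises IndexError and the port's '.getD 0' value is not claimed).
def repair_to_permutation (child : List Int) (n : Int) : List Int :=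
  let missing : List Int :=
    (PySem.List.pyRange 0 n 1).filter (fun c => !(PySem.Set.contains (PySem.Set.ofList child) c))
  let st := child.foldl
    (fun (st : PySem.Set Int × Nat × List Int) gene =>
      if !(PySem.Set.contains st.1 gene) then
        (PySem.Set.add st.1 gene, st.2.1, st.2.2 ++ [gene])
      else
        (st.1, st.2.1 + 1, st.2.2 ++ [(missing[st.2.1]?).getD 0]))
    (PySem.Set.empty, 0, [])
  st.2.2

-- ===== PORT B =====
-- B: no running state — one comprehension over enumerate(child); a position keeps its
-- gene iff child.index(g) == i, else it receives missing[i - len(set(child[:i]))]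
-- (the number of non-first-occurrence positions before i; '.getD 0' caveat outside Pre_).
def repair_to_permutation_alt (child : List Int) (n : Int) : List Int :=
  let missing : List Int :=
    (PySem.List.pyRange 0 n 1).filter (fun c => !(PySem.Set.contains (PySem.Set.ofList child) c))
  (PySem.List.enumerate child).map (fun p =>
    if (PySem.List.index? child p.2).map (fun k => (k : Int)) = some p.1 then p.2
    else (PySem.List.pyGet? missing
        (p.1 - ((PySem.Set.ofList (PySem.List.slice child none (some p.1))).length : Int))).getD 0)

-- ===== PRECONDITION & SPEC =====
-- Pre_ excludes exactly the inputs on which Python A raises IndexError: those where the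
-- number of duplicate positions in child exceeds the number of values of range(n) absent from child.
-- #missing = max(n,0) − #(distinct child values inside [0,n)); stated arithmetically so it
-- is decidable without materializing range(n).
def Pre_repair_to_permutation (child : List Int) (n : Int) : Prop :=
  ((child.length : Int) - ((PySem.Set.ofList child).length : Int)) ≤
    max n 0 - (((PySem.Set.ofList child).filter (fun c => decide (0 ≤ c ∧ c < n))).length : Int)

instance (child : List Int) (n : Int) : Decidable (Pre_repair_to_permutation child n) := by
  unfold Pre_repair_to_permutation; infer_instance

def pvWitness_repair_to_permutation : List Int × Int := ([2, 0, 2, 2], 4)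

def Spec_repair_to_permutation (child : List Int) (n : Int) (out : List Int) : Prop := out = repair_to_permutation_alt child n
instance (child : List Int) (n : Int) (out : List Int) : Decidable (Spec_repair_to_permutation child n out) := by unfold Spec_repair_to_permutation; infer_instance

-- ===== CLAIM (what is proved, stated in full; the proofs are below) =====
def Claim_equal_repair_to_permutation : Prop := ∀ (child : List Int) (n : Int), Dom_repair_to_permutation child n → Pre_repair_to_permutation child n → Spec_repair_to_permutation child n (repair_to_permutation child n)

-- ===== LEMMAS AND PROOFS =====

-- The recursion computed by A's loop: walk the remaining genes with the set of genes seen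
-- so far and the index of the next missing value to consume.
def pvCore (m : List Int) (seen : PySem.Set Int) (i : Nat) : List Int → List Int
  | [] => []
  | g :: t =>
    if PySem.Set.contains seen g then
      (m[i]?).getD 0 :: pvCore m seen (i + 1) t
    else
      g :: pvCore m (PySem.Set.add seen g) i t

-- A's loop computes pvCore (appended after the accumulator).
theorem pvA_loop (m : List Int) (rest : List Int) (seen : PySem.Set Int) (i : Nat) (acc : List Int) :
    (rest.foldl
      (fun (st : PySem.Set Int × Nat × List Int) gene =>
        if !(PySem.Set.contains st.1 gene) then
          (PySem.Set.add st.1 gene, st.2.1, st.2.2 ++ [gene])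
        else
          (st.1, st.2.1 + 1, st.2.2 ++ [(m[st.2.1]?).getD 0]))
      (seen, i, acc)).2.2 = acc ++ pvCore m seen i rest := by
  induction rest generalizing seen i acc with
  | nil => simp [pvCore]
  | cons g t ih =>
    by_cases h : g ∈ seen
    · have hc : ¬ ((!PySem.Set.contains seen g) = true) := by simp [h]
      rw [List.foldl_cons]
      show (List.foldl _ (if (!PySem.Set.contains seen g) = true then
          (PySem.Set.add seen g, i, acc ++ [g]) else (seen, i + 1, acc ++ [(m[i]?).getD 0])) t).2.2 = _
      rw [if_neg hc, ih]
      simp [pvCore, h]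
    · have hc : (!PySem.Set.contains seen g) = true := by simp [h]
      rw [List.foldl_cons]
      show (List.foldl _ (if (!PySem.Set.contains seen g) = true then
          (PySem.Set.add seen g, i, acc ++ [g]) else (seen, i + 1, acc ++ [(m[i]?).getD 0])) t).2.2 = _
      rw [if_pos hc, ih]
      simp [pvCore, h]


-- In 'child = pre ++ g :: t', the first occurrence of g is at pre.length iff g ∉ pre.
theorem pvIndex_mid (pre t : List Int) (g : Int) :
    PySem.List.index? (pre ++ g :: t) g = some pre.length ↔ g ∉ pre := by
  constructor
  · intro h hg
    obtain ⟨hk, _, hall⟩ := PySem.List.getElem_of_index?_eq_some h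
    obtain ⟨j, hj, hjg⟩ := List.mem_iff_getElem.mp hg
    exact hall j (by omega) (by simpa [List.getElem_append_left hj] using hjg)
  · intro hg
    exact (PySem.List.index?_eq_some_iff _ _ _).mpr ⟨pre, t, rfl, rfl, hg⟩

-- Same fact lifted through the Int-valued comparison B makes.
theorem pvCondIff (pre t : List Int) (g : Int) :
    (PySem.List.index? (pre ++ g :: t) g).map (fun k => (k : Int)) = some (pre.length : Int) ↔ g ∉ pre := by
  rw [← pvIndex_mid pre t g]
  cases h : PySem.List.index? (pre ++ g :: t) g with
  | none => simp
  | some k => simp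

theorem pvAdd_append (pre : List Int) (g : Int) :
    PySem.Set.ofList (pre ++ [g]) = PySem.Set.add (PySem.Set.ofList pre) g := by
  rw [PySem.Set.ofList_eq_foldl, PySem.Set.ofList_eq_foldl, List.foldl_append]
  rfl

-- pvCore, started after a processed prefix 'pre' of child with the missing-cursor at
-- 'cursor' = #duplicate positions inside pre, equals B's positional map over the suffix.
theorem pvCore_eq_map (m child : List Int) (rest : List Int) : ∀ (pre : List Int) (cursor : Nat),
    child = pre ++ rest →
    (cursor : Int) = (pre.length : Int) - ((PySem.Set.ofList pre).length : Int) →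
    pvCore m (PySem.Set.ofList pre) cursor rest
      = (PySem.List.enumerate rest (pre.length : Int)).map (fun p =>
          if (PySem.List.index? child p.2).map (fun k => (k : Int)) = some p.1 then p.2
          else (PySem.List.pyGet? m
              (p.1 - ((PySem.Set.ofList (PySem.List.slice child none (some p.1))).length : Int))).getD 0) := by
  induction rest with
  | nil => intro pre cursor _ _; simp [pvCore, PySem.List.enumerate]
  | cons g t ih =>
    intro pre cursor hchild hcur
    subst hchild
    have hslice : PySem.List.slice (pre ++ g :: t) none (some (pre.length : Int)) = pre := by
      rw [PySem.List.slice_to_natCast]; exact List.take_left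
    have hassoc : pre ++ g :: t = (pre ++ [g]) ++ t := by simp
    rw [PySem.List.enumerate_cons, List.map_cons]
    by_cases hg : g ∈ pre
    · -- duplicate position
      have hseen : PySem.Set.contains (PySem.Set.ofList pre) g = true := by
        simp [PySem.Set.mem_ofList, hg]
      have hcond : ¬ ((PySem.List.index? (pre ++ g :: t) g).map (fun k => (k : Int)) = some (pre.length : Int)) := by
        rw [pvCondIff pre t g]; simp [hg]
      have hset : PySem.Set.ofList (pre ++ [g]) = PySem.Set.ofList pre := by
        rw [pvAdd_append]
        simp [PySem.Set.add, PySem.Set.mem_ofList, hg]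
      have hhead : PySem.List.pyGet? m
          ((pre.length : Int) - ((PySem.Set.ofList (PySem.List.slice (pre ++ g :: t) none (some (pre.length : Int)))).length : Int))
            = m[cursor]? := by
        rw [hslice, ← hcur, PySem.List.pyGet?_natCast]
      have ih' := ih (pre ++ [g]) (cursor + 1) hassoc
        (by rw [hset]; simp only [List.length_append, List.length_singleton]; push_cast at hcur ⊢; omega)
      rw [hset] at ih'
      simp only [List.length_append, List.length_singleton] at ih'
      push_cast at ih'
      simp only [pvCore, hseen, if_true, if_neg hcond]
      rw [hhead, ih']
    · -- first occurrence
      have hseen : PySem.Set.contains (PySem.Set.ofList pre) g = false := by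
        simp [PySem.Set.mem_ofList, hg]
      have hcond : (PySem.List.index? (pre ++ g :: t) g).map (fun k => (k : Int)) = some (pre.length : Int) :=
        (pvCondIff pre t g).mpr hg
      have hsetlen : ((PySem.Set.ofList (pre ++ [g])).length : Int) = ((PySem.Set.ofList pre).length : Int) + 1 := by
        rw [pvAdd_append]
        have : PySem.Set.contains (PySem.Set.ofList pre) g = false := hseen
        simp [PySem.Set.add, PySem.Set.mem_ofList, hg]
      have ih' := ih (pre ++ [g]) cursor hassoc
        (by rw [hsetlen]; simp only [List.length_append, List.length_singleton]; push_cast at hcur ⊢; omega)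
      rw [pvAdd_append] at ih'
      simp only [List.length_append, List.length_singleton] at ih'
      push_cast at ih'
      simp only [pvCore, hseen, Bool.false_eq_true, if_false, if_pos hcond]
      rw [ih']

-- ===== VERDICT (by name: the statement is the Claim_ definition above) =====
theorem repair_to_permutation_spec : Claim_equal_repair_to_permutation := by
  intro child n _ _
  unfold Spec_repair_to_permutation repair_to_permutation repair_to_permutation_alt
  simp only
  rw [pvA_loop]
  have h := pvCore_eq_map
    ((PySem.List.pyRange 0 n 1).filter (fun c => !(PySem.Set.contains (PySem.Set.ofList child) c)))
    child child [] 0 rfl (by simp [PySem.Set.ofList])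
  simpa [PySem.Set.empty, PySem.Set.ofList] using h
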